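-- pv_equiv track=rewrite | github.com/DPFNeiland/Python-Environment | Problems/BeeCrowd/bee1531non.py | CalcularResto
-- ===== SOURCE A (Python) =====
-- def TransformarCharParaInt(c: str):
--     return ord(c) - ord('0')
--
-- def CalcularResto(s: str, d: int) -> int:
--     base = 1%d
--     res = 0
--     for i in range(len(s)-1,-1,-1):
--         num = TransformarCharParaInt(s[i])
--         res = (res + (num*base)%d)%d
--         base = (base*10) % d
--     return res
-- ===== SOURCE B (Python) =====
-- def CalcularResto(s: str, d: int) -> int:
--     res = 0
--     for c in s:
--         res = (res * 10 + (ord(c) - ord('0'))) % d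
--     return res
-- ===== Notes on version B (the rewrite author's own statement) =====
-- stated objective: simpler
-- what changed: Replaces the right-to-left indexed scan that maintains a running power-of-ten base with a left-to-right Horner fold keeping only the running remainder (no base variable, no index arithmetic).
import Mathlib
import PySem

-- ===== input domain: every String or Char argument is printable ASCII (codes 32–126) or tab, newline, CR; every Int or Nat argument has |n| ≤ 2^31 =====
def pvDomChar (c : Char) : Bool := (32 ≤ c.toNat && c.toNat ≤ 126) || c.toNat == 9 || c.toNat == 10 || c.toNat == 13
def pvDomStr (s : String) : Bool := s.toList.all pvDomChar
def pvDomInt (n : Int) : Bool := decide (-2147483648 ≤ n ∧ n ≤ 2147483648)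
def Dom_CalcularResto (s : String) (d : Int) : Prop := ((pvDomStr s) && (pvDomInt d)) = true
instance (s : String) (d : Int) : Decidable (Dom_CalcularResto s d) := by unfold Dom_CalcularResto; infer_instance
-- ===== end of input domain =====

-- B replaces A's right-to-left scan with a maintained power-of-ten base by a left-to-right
-- Horner fold that keeps only the running remainder (objective: simpler).


-- ===== PORT A =====
def TransformarCharParaInt (c : Char) : Int := (c.toNat : Int) - 48

def CalcularResto (s : String) (d : Int) : Int :=
  let l := s.toList
  let base := PySem.Int.mod 1 d
  let st := (PySem.List.pyRange ((l.length : Int) - 1) (-1) (-1)).foldl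
    (fun (st : Int × Int) (i : Int) =>
      let num := TransformarCharParaInt (PySem.List.pyGetD l i ' ')
      (PySem.Int.mod (st.1 + PySem.Int.mod (num * st.2) d) d,
       PySem.Int.mod (st.2 * 10) d))
    (0, base)
  st.1

-- ===== PORT B =====
def CalcularResto_alt (s : String) (d : Int) : Int :=
  s.toList.foldl (fun res c => PySem.Int.mod (res * 10 + ((c.toNat : Int) - 48)) d) 0

-- ===== PRECONDITION & SPEC =====
-- Pre_ excludes exactly d = 0, where Python A raises ZeroDivisionError at `base = 1%d`.
def Pre_CalcularResto (s : String) (d : Int) : Prop := d ≠ 0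
instance (s : String) (d : Int) : Decidable (Pre_CalcularResto s d) := by unfold Pre_CalcularResto; infer_instance
def pvWitness_CalcularResto : String × Int := ("123", 7)

def Spec_CalcularResto (s : String) (d : Int) (out : Int) : Prop := out = CalcularResto_alt s d
instance (s : String) (d : Int) (out : Int) : Decidable (Spec_CalcularResto s d out) := by unfold Spec_CalcularResto; infer_instance

-- ===== CLAIM (what is proved, stated in full; the proofs are below) =====
def Claim_equal_CalcularResto : Prop := ∀ (s : String) (d : Int), Dom_CalcularResto s d → Pre_CalcularResto s d → Spec_CalcularResto s d (CalcularResto s d)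
-- ===== LEMMAS AND PROOFS =====

-- value of a digit list, least-significant digit first
def pvValR : List Char → Int
  | [] => 0
  | c :: t => TransformarCharParaInt c + 10 * pvValR t

theorem pvValR_append (m : List Char) (c : Char) :
    pvValR (m ++ [c]) = pvValR m + TransformarCharParaInt c * 10 ^ m.length := by
  induction m with
  | nil => simp [pvValR]
  | cons x t ih => simp [pvValR, ih, pow_succ]; ring

theorem pvHorner (l : List Char) (a : Int) :
    l.foldl (fun x c => x * 10 + TransformarCharParaInt c) a
      = a * 10 ^ l.length + pvValR l.reverse := by
  induction l generalizing a with
  | nil => simp [pvValR]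
  | cons c t ih =>
      simp only [List.foldl_cons, ih, List.reverse_cons, pvValR_append,
        List.length_reverse, List.length_cons, pow_succ]
      ring

theorem pv_fmod_addmul (d R B x : Int) :
    Int.fmod (Int.fmod R d + Int.fmod (x * Int.fmod B d) d) d = Int.fmod (R + x * B) d := by
  conv_lhs => rw [Int.mul_fmod, Int.fmod_fmod, ← Int.mul_fmod]
  rw [← Int.add_fmod]

theorem pv_fmod_mul10 (d B : Int) :
    Int.fmod (Int.fmod B d * 10) d = Int.fmod (B * 10) d := by
  conv_lhs => rw [Int.mul_fmod, Int.fmod_fmod, ← Int.mul_fmod]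

theorem pvA_fold (d : Int) (m : List Char) (R B : Int) :
    (m.foldl (fun (st : Int × Int) c =>
        (Int.fmod (st.1 + Int.fmod (TransformarCharParaInt c * st.2) d) d,
         Int.fmod (st.2 * 10) d))
      (Int.fmod R d, Int.fmod B d)).1
      = Int.fmod (R + B * pvValR m) d := by
  induction m generalizing R B with
  | nil => simp [pvValR]
  | cons c t ih =>
      simp only [List.foldl_cons, pvValR]
      rw [pv_fmod_addmul, pv_fmod_mul10, ih]
      ring_nf

theorem pvB_fold (d : Int) (l : List Char) (a : Int) :
    l.foldl (fun res c => Int.fmod (res * 10 + TransformarCharParaInt c) d) (Int.fmod a d)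
      = Int.fmod (l.foldl (fun x c => x * 10 + TransformarCharParaInt c) a) d := by
  induction l generalizing a with
  | nil => simp
  | cons c t ih =>
      simp only [List.foldl_cons]
      rw [show Int.fmod (Int.fmod a d * 10 + TransformarCharParaInt c) d
            = Int.fmod (a * 10 + TransformarCharParaInt c) d by
          rw [Int.add_fmod, Int.mul_fmod, Int.fmod_fmod, ← Int.mul_fmod, ← Int.add_fmod],
        ih]

-- ===== VERDICT (by name: the statement is the Claim_ definition above) =====
theorem CalcularResto_spec : Claim_equal_CalcularResto := by
  intro s d _ _
  unfold Spec_CalcularResto CalcularResto CalcularResto_alt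
  set l := s.toList with hl
  simp only [PySem.Int.mod]
  have hrange : PySem.List.pyRange ((l.length : Int) - 1) (-1) (-1)
      = (PySem.List.pyRange 0 (l.length : Int) 1).reverse := by
    rw [PySem.List.pyRange_neg_one_eq_reverse]
    norm_num
  rw [hrange]
  rw [← List.foldl_map (f := fun i => PySem.List.pyGetD l i ' ')
        (g := fun (st : Int × Int) c =>
          (Int.fmod (st.1 + Int.fmod (TransformarCharParaInt c * st.2) d) d,
           Int.fmod (st.2 * 10) d))]
  rw [List.map_reverse, PySem.List.map_pyGetD_pyRange_zero']
  have hA := pvA_fold d l.reverse 0 1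
  rw [Int.zero_fmod] at hA
  have h1 : Int.fmod (1:Int) d = Int.fmod 1 d := rfl
  rw [show ((0:Int), Int.fmod 1 d) = (Int.fmod 0 d, Int.fmod 1 d) by rw [Int.zero_fmod]]
  rw [pvA_fold]
  have hB : l.foldl (fun res c => Int.fmod (res * 10 + ((c.toNat : Int) - 48)) d) 0
      = Int.fmod (l.foldl (fun x c => x * 10 + TransformarCharParaInt c) 0) d := by
    rw [show (0:Int) = Int.fmod 0 d by rw [Int.zero_fmod]]
    exact pvB_fold d l 0
  rw [hB, pvHorner]
  ring_nf
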